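-- pv_equiv track=rewrite | github.com/MarcerCyoon/TheGeniusRepository | catalog/templatetags/genius_extras.py | parse_emojis
-- ===== SOURCE A (Python) =====
-- def parse_emojis(value):
-- 	# this is up there as some of the worst and least Pythonic code I've written ;;
-- 	# cut me some slack I tried so many things and came to the conclusion I just
-- 	# had to manually for loop through strings :sob: I am stupid
-- 	import copy
-- 	emoji = False
-- 	number = False
-- 	start = -1
-- 	number_start = -1
-- 	end = -1
-- 	original = copy.deepcopy(value)
--
-- 	for i, chr in enumerate(original):
-- 		if not emoji:
-- 			if chr == ":" and i != 0:
-- 				if original[i-1] == "<":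
-- 					# detected start of emoji
-- 					emoji = True
-- 					start = i-1
-- 		else:
-- 			if not number:
-- 				if chr == ":":
-- 					# detected start of number string in emoji that corresponds to emoji ID
-- 					number = True
-- 					number_start = i+1
-- 			else:
-- 				if chr == ">":
-- 					# the emoji string has ended
-- 					end = i
-- 					numbers = original[number_start:end]
--
-- 					def is_a_number(n):
-- 						try:
-- 							int(n)
-- 						except:
-- 							return False
-- 						return True
--
-- 					if is_a_number(numbers):
-- 						# if the numbers actually form a string of integers, we have (probably) detected an emoji
-- 						alt = original[start+1:number_start] # we want the alt to be in the form of :thonk: (surrounded by colons)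
-- 						to_be_replaced = original[start:end+1] # to_be_replaced is just the whole string
-- 						link = f"https://cdn.discordapp.com/emojis/{numbers}.png?size=160"
-- 						string = f'<img src="{link}" class="emoji" alt="{alt}"></img>'
-- 						value = value.replace(to_be_replaced, string)
--
-- 					emoji = False
-- 					number = False
-- 					start = -1
-- 					number_start = -1
-- 					end = -1
--
-- 	return value
-- ===== SOURCE B (Python) =====
-- import re
--
-- def parse_emojis(value):
--     # Regex scan of the original text instead of a manual character state machine;
--     # same global str.replace per valid match, in left-to-right match order.
--     for m in re.finditer(r'<:([^:]*):([^>]*)>', value):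
--         numbers = m.group(2)
--         try:
--             int(numbers)
--         except Exception:
--             continue
--         alt = ':' + m.group(1) + ':'
--         link = f"https://cdn.discordapp.com/emojis/{numbers}.png?size=160"
--         string = f'<img src="{link}" class="emoji" alt="{alt}"></img>'
--         value = value.replace(m.group(0), string)
--     return value
-- ===== Notes on version B (the rewrite author's own statement) =====
-- stated objective: idiomatic
-- what changed: Replaces A's hand-written per-character state machine (booleans emoji/number plus index bookkeeping over enumerate) with regex-style scanning: the non-overlapping matches of <:([^:]*):([^>]*)> are found left to right (re.finditer in Python), then for each match the same int() validity test and the same global str.replace are applied in match order.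
import Mathlib
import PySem

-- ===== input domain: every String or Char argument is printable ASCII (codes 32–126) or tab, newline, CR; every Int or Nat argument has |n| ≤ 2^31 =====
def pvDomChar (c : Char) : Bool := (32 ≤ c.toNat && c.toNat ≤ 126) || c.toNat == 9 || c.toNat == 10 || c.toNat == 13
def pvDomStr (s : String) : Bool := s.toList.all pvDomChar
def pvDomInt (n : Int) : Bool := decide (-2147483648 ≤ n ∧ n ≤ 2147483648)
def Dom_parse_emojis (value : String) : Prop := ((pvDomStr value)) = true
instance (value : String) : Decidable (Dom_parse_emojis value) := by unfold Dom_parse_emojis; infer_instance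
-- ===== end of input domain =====

-- B replaces A's hand-written per-character state machine by regex-style scanning
-- (the matches of <:([^:]*):([^>]*)> found left to right, then the same global
-- str.replace per valid match); same return value, no speed claim.

-- ===== PORT A =====
-- A's loop body (the for-loop over enumerate(original)); state = (emoji, number, start, number_start, end, value)
def parseStep (original : String) :
    (Bool × Bool × Int × Int × Int × String) → (Int × Char) → (Bool × Bool × Int × Int × Int × String)
  | (emoji, number, start, number_start, end_, value), (i, c) =>
    if emoji = false then
      if c = ':' ∧ i ≠ 0 then
        if PySem.Str.pyGet? original (i - 1) = some '<' then
          (true, number, i - 1, number_start, end_, value)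
        else (emoji, number, start, number_start, end_, value)
      else (emoji, number, start, number_start, end_, value)
    else
      if number = false then
        if c = ':' then (emoji, true, start, i + 1, end_, value)
        else (emoji, number, start, number_start, end_, value)
      else
        if c = '>' then
          let end2 := i
          let numbers := PySem.Str.slice original (some number_start) (some end2)
          let value' :=
            if (PySem.Int.ofStr? numbers).isSome then
              let alt := PySem.Str.slice original (some (start + 1)) (some number_start)
              let to_be_replaced := PySem.Str.slice original (some start) (some (end2 + 1))
              let link := "https://cdn.discordapp.com/emojis/" ++ numbers ++ ".png?size=160"
              PySem.Str.replace value to_be_replaced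
                ("<img src=\"" ++ link ++ "\" class=\"emoji\" alt=\"" ++ alt ++ "\"></img>")
            else value
          (false, false, -1, -1, -1, value')
        else (emoji, number, start, number_start, end_, value)

def parse_emojis (value : String) : String :=
  let original := value
  ((PySem.List.enumerate original.toList).foldl (parseStep original)
    (false, false, -1, -1, -1, value)).2.2.2.2.2

-- ===== PORT B =====
-- Hand port of the regex engine for the fixed pattern <:([^:]*):([^>]*)>: a match
-- attempt at the current position (exact for this pattern: literal "<:", then the
-- shortest ([^:]*) before a ':', then the shortest ([^>]*) before a '>').
def matchAt : List Char → Option (List Char × List Char × List Char)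
  | c1 :: c2 :: rest =>
    if c1 = '<' ∧ c2 = ':' then
      match rest.dropWhile (· != ':') with
      | [] => none
      | _ :: r2 =>
        match r2.dropWhile (· != '>') with
        | [] => none
        | _ :: r3 => some (rest.takeWhile (· != ':'), r2.takeWhile (· != '>'), r3)
    else none
  | _ => none

theorem matchAt_length {cs n1 m1 r3} (h : matchAt cs = some (n1, m1, r3)) :
    r3.length < cs.length := by
  match cs with
  | [] => simp [matchAt] at h
  | [c] => simp [matchAt] at h
  | c1 :: c2 :: rest =>
    simp only [matchAt] at h
    split at h
    · split at h
      · exact absurd h (by simp)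
      · rename_i r2 h1
        split at h
        · exact absurd h (by simp)
        · rename_i r3' h2
          have a1 := List.length_dropWhile_le (p := (· != ':')) (l := rest)
          rw [h1] at a1
          have a2 := List.length_dropWhile_le (p := (· != '>')) (l := r2)
          rw [h2] at a2
          simp only [Option.some.injEq, Prod.mk.injEq] at h
          obtain ⟨-, -, hr⟩ := h
          subst hr
          simp only [List.length_cons] at a1 a2 ⊢
          omega
    · exact absurd h (by simp)

-- finditer: non-overlapping matches, left to right; on failure advance one character.
def findMatches (cs : List Char) : List (List Char × List Char) :=
  match h : matchAt cs with
  | some (name, num, r) => (name, num) :: findMatches r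
  | none =>
    match cs with
    | [] => []
    | _ :: rest => findMatches rest
termination_by cs.length
decreasing_by
  · exact matchAt_length h
  · simp

-- body of B's for-loop over the matches
def replaceStep (v : String) (m : List Char × List Char) : String :=
  let name := String.ofList m.1
  let numbers := String.ofList m.2
  if (PySem.Int.ofStr? numbers).isSome then
    let alt := ":" ++ name ++ ":"
    let full := "<:" ++ name ++ ":" ++ numbers ++ ">"
    let link := "https://cdn.discordapp.com/emojis/" ++ numbers ++ ".png?size=160"
    PySem.Str.replace v full
      ("<img src=\"" ++ link ++ "\" class=\"emoji\" alt=\"" ++ alt ++ "\"></img>")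
  else v

def parse_emojis_alt (value : String) : String :=
  (findMatches value.toList).foldl replaceStep value

-- ===== PRECONDITION & SPEC =====
def Spec_parse_emojis (value : String) (out : String) : Prop := out = parse_emojis_alt value
instance (value : String) (out : String) : Decidable (Spec_parse_emojis value out) := by unfold Spec_parse_emojis; infer_instance

-- ===== CLAIM (what is proved, stated in full; the proofs are below) =====
def Claim_equal_parse_emojis : Prop := ∀ (value : String), Dom_parse_emojis value → Spec_parse_emojis value (parse_emojis value)

-- ===== LEMMAS AND PROOFS =====

theorem dropWhile_head_false {p : Char → Bool} {l r : List Char} {d : Char}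
    (h : l.dropWhile p = d :: r) : p d = false := by
  have hne : l.dropWhile p ≠ [] := by simp [h]
  have h2 := List.head_dropWhile_not p hne
  have h3 : (l.dropWhile p).head hne = d := by
    have h4 : (l.dropWhile p).head? = some d := by rw [h]; rfl
    rw [List.head?_eq_some_head hne, Option.some.injEq] at h4
    exact h4
  rwa [h3] at h2

theorem matchAt_some {cs n1 m1 r3} (h : matchAt cs = some (n1, m1, r3)) :
    cs = '<' :: ':' :: (n1 ++ ':' :: (m1 ++ '>' :: r3)) ∧
    (∀ x ∈ n1, x ≠ ':') ∧ (∀ x ∈ m1, x ≠ '>') := by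
  match cs with
  | [] => simp [matchAt] at h
  | [c] => simp [matchAt] at h
  | c1 :: c2 :: rest =>
    simp only [matchAt] at h
    split at h
    · rename_i hc
      obtain ⟨hc1, hc2⟩ := hc
      subst hc1; subst hc2
      split at h
      · exact absurd h (by simp)
      · rename_i d1 r2 h1
        split at h
        · exact absurd h (by simp)
        · rename_i d2 r3' h2
          simp only [Option.some.injEq, Prod.mk.injEq] at h
          obtain ⟨hn, hm, hr⟩ := h
          subst hn; subst hm; subst hr
          have hd1 : d1 = ':' := by simpa using dropWhile_head_false h1
          have hd2 : d2 = '>' := by simpa using dropWhile_head_false h2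
          subst hd1; subst hd2
          refine ⟨?_, ?_, ?_⟩
          · have e1 : rest = rest.takeWhile (· != ':') ++ ':' :: r2 := by
              conv_lhs => rw [← List.takeWhile_append_dropWhile (p := (· != ':')) (l := rest)]
              rw [h1]
            have e2 : r2 = r2.takeWhile (· != '>') ++ '>' :: r3' := by
              conv_lhs => rw [← List.takeWhile_append_dropWhile (p := (· != '>')) (l := r2)]
              rw [h2]
            rw [List.cons_inj_right, List.cons_inj_right]
            conv_lhs => rw [e1]
            conv_lhs => rw [e2]
          · intro x hx
            have := List.mem_takeWhile_imp hx
            simpa using this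
          · intro x hx
            have := List.mem_takeWhile_imp hx
            simpa using this
    · exact absurd h (by simp)

theorem findMatches_nil : findMatches [] = [] := by
  rw [findMatches]; rfl

theorem findMatches_cons_some {cs n1 m1 r3} (h : matchAt cs = some (n1, m1, r3)) :
    findMatches cs = (n1, m1) :: findMatches r3 := by
  rw [findMatches]
  split
  · rename_i n m r h'
    rw [h] at h'
    simp only [Option.some.injEq, Prod.mk.injEq] at h'
    obtain ⟨a, b, c⟩ := h'
    subst a; subst b; subst c; rfl
  · rename_i h'
    rw [h] at h'; exact absurd h' (by simp)

theorem findMatches_cons_none {c rest} (h : matchAt (c :: rest) = none) :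
    findMatches (c :: rest) = findMatches rest := by
  rw [findMatches]
  split
  · rename_i n m r h'
    rw [h] at h'; exact absurd h' (by simp)
  · rfl

theorem findMatches_no_gt {l : List Char} (h : ∀ x ∈ l, x ≠ '>') : findMatches l = [] := by
  induction l with
  | nil => exact findMatches_nil
  | cons c rest ih =>
    cases hma : matchAt (c :: rest) with
    | some t =>
      obtain ⟨n1, m1, r3⟩ := t
      obtain ⟨hcs, -, -⟩ := matchAt_some hma
      exfalso
      exact h '>' (by rw [hcs]; simp) rfl
    | none =>
      rw [findMatches_cons_none hma]
      exact ih (fun x hx => h x (by simp [hx]))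

theorem findMatches_no_colon {l : List Char} (h : ∀ x ∈ l, x ≠ ':') : findMatches l = [] := by
  induction l with
  | nil => exact findMatches_nil
  | cons c rest ih =>
    cases hma : matchAt (c :: rest) with
    | some t =>
      obtain ⟨n1, m1, r3⟩ := t
      obtain ⟨hcs, -, -⟩ := matchAt_some hma
      exfalso
      exact h ':' (by rw [hcs]; simp) rfl
    | none =>
      rw [findMatches_cons_none hma]
      exact ih (fun x hx => h x (by simp [hx]))

theorem findMatches_stuck {n1 r2 : List Char} (hn1 : ∀ x ∈ n1, x ≠ ':')
    (hr2 : ∀ x ∈ r2, x ≠ '>') : findMatches (n1 ++ ':' :: r2) = [] := by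
  induction n1 with
  | nil =>
    cases hma : matchAt (':' :: r2) with
    | some t =>
      obtain ⟨n, m, r⟩ := t
      obtain ⟨hcs, -, -⟩ := matchAt_some hma
      simp at hcs
    | none =>
      rw [List.nil_append, findMatches_cons_none hma]
      exact findMatches_no_gt hr2
  | cons a n1' ih =>
    cases hma : matchAt (a :: (n1' ++ ':' :: r2)) with
    | some t =>
      obtain ⟨n, m, r⟩ := t
      obtain ⟨hcs, -, -⟩ := matchAt_some hma
      exfalso
      obtain ⟨-, htl⟩ := List.cons.inj hcs
      cases n1' with
      | nil =>
        simp only [List.nil_append] at htl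
        obtain ⟨-, htl2⟩ := List.cons.inj htl
        exact hr2 '>' (by rw [htl2]; simp) rfl
      | cons b n1'' =>
        simp only [List.cons_append] at htl
        obtain ⟨hb, -⟩ := List.cons.inj htl
        exact hn1 b (by simp) hb
    | none =>
      rw [List.cons_append, findMatches_cons_none hma]
      exact ih (fun x hx => hn1 x (by simp [hx]))

-- A's loop skips over name characters (state emoji ∧ ¬number, no ':')
theorem foldA_state1_skip (o : String) (pre : List Char) (hpre : ∀ x ∈ pre, x ≠ ':') :
    ∀ (post : List Char) (j s ns e : Int) (v : String),
    List.foldl (parseStep o) (true, false, s, ns, e, v) (PySem.List.enumerate (pre ++ post) j)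
    = List.foldl (parseStep o) (true, false, s, ns, e, v)
        (PySem.List.enumerate post (j + pre.length)) := by
  induction pre with
  | nil => intro post j s ns e v; simp
  | cons a pre ih =>
    intro post j s ns e v
    have ha : a ≠ ':' := hpre a (by simp)
    rw [List.cons_append, PySem.List.enumerate_cons, List.foldl_cons]
    have hred : parseStep o (true, false, s, ns, e, v) (j, a) = (true, false, s, ns, e, v) := by
      simp [parseStep, ha]
    rw [hred, ih (fun x hx => hpre x (by simp [hx]))]
    have harith : ∀ x : Int, x + 1 + (pre.length : Int) = x + ((a :: pre).length : Int) := by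
      intro x; push_cast [List.length_cons]; ring
    rw [harith]

-- A's loop skips over number characters (state emoji ∧ number, no '>')
theorem foldA_state2_skip (o : String) (pre : List Char) (hpre : ∀ x ∈ pre, x ≠ '>') :
    ∀ (post : List Char) (j s ns e : Int) (v : String),
    List.foldl (parseStep o) (true, true, s, ns, e, v) (PySem.List.enumerate (pre ++ post) j)
    = List.foldl (parseStep o) (true, true, s, ns, e, v)
        (PySem.List.enumerate post (j + pre.length)) := by
  induction pre with
  | nil => intro post j s ns e v; simp
  | cons a pre ih =>
    intro post j s ns e v
    have ha : a ≠ '>' := hpre a (by simp)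
    rw [List.cons_append, PySem.List.enumerate_cons, List.foldl_cons]
    have hred : parseStep o (true, true, s, ns, e, v) (j, a) = (true, true, s, ns, e, v) := by
      simp [parseStep, ha]
    rw [hred, ih (fun x hx => hpre x (by simp [hx]))]
    have harith : ∀ x : Int, x + 1 + (pre.length : Int) = x + ((a :: pre).length : Int) := by
      intro x; push_cast [List.length_cons]; ring
    rw [harith]

theorem foldA_state1_nil (o : String) (l : List Char) (h : ∀ x ∈ l, x ≠ ':')
    (j s ns e : Int) (v : String) :
    List.foldl (parseStep o) (true, false, s, ns, e, v) (PySem.List.enumerate l j)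
      = (true, false, s, ns, e, v) := by
  have := foldA_state1_skip o l h [] j s ns e v
  simpa using this

theorem foldA_state2_nil (o : String) (l : List Char) (h : ∀ x ∈ l, x ≠ '>')
    (j s ns e : Int) (v : String) :
    List.foldl (parseStep o) (true, true, s, ns, e, v) (PySem.List.enumerate l j)
      = (true, true, s, ns, e, v) := by
  have := foldA_state2_skip o l h [] j s ns e v
  simpa using this

theorem matchAt_ne_lt {c : Char} {rest : List Char} (h : c ≠ '<') :
    matchAt (c :: rest) = none := by
  cases rest with
  | nil => simp [matchAt]
  | cons b t => simp [matchAt, h]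

-- the first two steps of A's loop on "<:" : enter the emoji state
theorem foldA_enter (o : String) (j : Nat) (rest2 : List Char) (v : String)
    (hg : o.toList[j]? = some '<') :
    List.foldl (parseStep o) (false, false, -1, -1, -1, v)
      (PySem.List.enumerate ('<' :: ':' :: rest2) (j : Int))
    = List.foldl (parseStep o) (true, false, (j : Int), -1, -1, v)
      (PySem.List.enumerate rest2 ((j : Int) + 1 + 1)) := by
  rw [PySem.List.enumerate_cons, List.foldl_cons, PySem.List.enumerate_cons, List.foldl_cons]
  have s1 : parseStep o (false, false, -1, -1, -1, v) ((j : Int), '<')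
      = (false, false, -1, -1, -1, v) := by simp [parseStep]
  rw [s1]
  have hne : ((j : Int) + 1) ≠ 0 := by omega
  have e1 : ((j : Int) + 1) - 1 = ((j : Nat) : Int) := by ring
  have s2 : parseStep o (false, false, -1, -1, -1, v) ((j : Int) + 1, ':')
      = (true, false, (j : Int), -1, -1, v) := by
    simp [parseStep, hne, e1, hg]
  rw [s2]

theorem main_sim (o : String) :
    ∀ (n j : Nat) (cs : List Char) (v : String),
    cs.length ≤ n →
    o.toList.drop j = cs →
    (j = 0 ∨ ¬(o.toList[j-1]? = some '<' ∧ o.toList[j]? = some ':')) →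
    (List.foldl (parseStep o) (false, false, -1, -1, -1, v)
        (PySem.List.enumerate cs (j : Int))).2.2.2.2.2
      = List.foldl replaceStep v (findMatches cs) := by
  intro n
  induction n with
  | zero =>
    intro j cs v hlen hdrop hpre
    cases cs with
    | nil => simp [findMatches_nil]
    | cons c rest => exact absurd hlen (by simp)
  | succ n ih =>
    intro j cs v hlen hdrop hpre
    cases cs with
    | nil => simp [findMatches_nil]
    | cons c rest =>
      have hidx : ∀ t : Nat, o.toList[j + t]? = (c :: rest)[t]? := by
        intro t
        rw [← List.getElem?_drop, hdrop]
      cases hma : matchAt (c :: rest) with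
      | some tri =>
        obtain ⟨n1, m1, r3⟩ := tri
        obtain ⟨hcs, hn1, hm1⟩ := matchAt_some hma
        obtain ⟨hc, hrest⟩ := List.cons.inj hcs
        subst hc; subst hrest
        -- abbreviations
        have hg : o.toList[j]? = some '<' := by simpa using hidx 0
        rw [findMatches_cons_some hma, List.foldl_cons]
        rw [foldA_enter o j _ v hg]
        rw [foldA_state1_skip o n1 hn1 _ _ _ _ _ _]
        rw [PySem.List.enumerate_cons, List.foldl_cons]
        have s3 : parseStep o (true, false, (j : Int), -1, -1, v)
            ((j : Int) + 1 + 1 + (n1.length : Int), ':')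
            = (true, true, (j : Int), (j : Int) + 1 + 1 + (n1.length : Int) + 1, -1, v) := by
          simp [parseStep]
        rw [s3]
        rw [foldA_state2_skip o m1 hm1 _ _ _ _ _ _]
        rw [PySem.List.enumerate_cons, List.foldl_cons]
        -- positions
        have eK : (j : Int) + 1 + 1 + (n1.length : Int) + 1 = ((j + 3 + n1.length : Nat) : Int) := by
          push_cast; ring
        have eR : (j : Int) + 1 + 1 + (n1.length : Int) + 1 + (m1.length : Int)
            = ((j + 3 + n1.length : Nat) : Int) + ((m1.length : Nat) : Int) := by
          push_cast; ring
        -- drop facts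
        have hdropN : o.toList.drop (j + (n1.length + 3)) = m1 ++ '>' :: r3 := by
          have h0 := congrArg (List.drop (n1.length + 3)) hdrop
          rw [List.drop_drop] at h0
          rw [h0]
          rw [show ('<' :: ':' :: (n1 ++ ':' :: (m1 ++ '>' :: r3)))
              = (('<' :: ':' :: n1) ++ [':']) ++ (m1 ++ '>' :: r3) by simp]
          rw [List.drop_left' (by simp <;> omega)]
        have hdrop1 : o.toList.drop (j + 1) = ':' :: (n1 ++ ':' :: (m1 ++ '>' :: r3)) := by
          have h0 := congrArg (List.drop 1) hdrop
          rw [List.drop_drop] at h0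
          simpa using h0
        -- slice values
        have hnum : PySem.Str.slice o (some ((j : Int) + 1 + 1 + (n1.length : Int) + 1))
            (some ((j : Int) + 1 + 1 + (n1.length : Int) + 1 + (m1.length : Int)))
            = String.ofList m1 := by
          apply String.toList_inj.mp
          rw [eR, eK]
          simp only [PySem.Str.toList_slice, PySem.Chars.slice_eq_listSlice,
            String.toList_ofList]
          rw [PySem.List.slice_natCast_add]
          rw [show j + 3 + n1.length = j + (n1.length + 3) by ring, hdropN]
          rw [List.take_left' rfl]
        have halt : PySem.Str.slice o (some ((j : Int) + 1))
            (some ((j : Int) + 1 + 1 + (n1.length : Int) + 1))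
            = ":" ++ String.ofList n1 ++ ":" := by
          apply String.toList_inj.mp
          rw [show ((j : Int) + 1) = ((j + 1 : Nat) : Int) by push_cast; ring]
          rw [show ((j + 1 : Nat) : Int) + 1 + (n1.length : Int) + 1
              = ((j + 1 : Nat) : Int) + ((n1.length + 2 : Nat) : Int) by push_cast; ring]
          simp only [PySem.Str.toList_slice, PySem.Chars.slice_eq_listSlice]
          rw [PySem.List.slice_natCast_add]
          rw [hdrop1]
          rw [show (':' :: (n1 ++ ':' :: (m1 ++ '>' :: r3)))
              = ((':' :: n1) ++ [':']) ++ (m1 ++ '>' :: r3) by simp]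
          rw [List.take_left' (by simp <;> omega)]
          simp
        have hfull : PySem.Str.slice o (some ((j : Int)))
            (some ((j : Int) + 1 + 1 + (n1.length : Int) + 1 + (m1.length : Int) + 1))
            = "<:" ++ String.ofList n1 ++ ":" ++ String.ofList m1 ++ ">" := by
          apply String.toList_inj.mp
          rw [show (j : Int) + 1 + 1 + (n1.length : Int) + 1 + (m1.length : Int) + 1
              = ((j : Nat) : Int) + ((n1.length + m1.length + 4 : Nat) : Int) by push_cast; ring]
          simp only [PySem.Str.toList_slice, PySem.Chars.slice_eq_listSlice]
          rw [PySem.List.slice_natCast_add]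
          rw [hdrop]
          rw [show ('<' :: ':' :: (n1 ++ ':' :: (m1 ++ '>' :: r3)))
              = (('<' :: ':' :: n1) ++ ':' :: m1 ++ ['>']) ++ r3 by simp]
          rw [List.take_left' (by simp <;> omega)]
          simp
        have s4 : parseStep o (true, true, (j : Int),
              (j : Int) + 1 + 1 + (n1.length : Int) + 1, -1, v)
            ((j : Int) + 1 + 1 + (n1.length : Int) + 1 + (m1.length : Int), '>')
            = (false, false, -1, -1, -1, replaceStep v (n1, m1)) := by
          simp only [parseStep]
          norm_num
          rw [hnum, hfull, halt]
          simp [replaceStep]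
        rw [s4]
        -- the tail via the induction hypothesis
        have hdropT : o.toList.drop (j + (n1.length + m1.length + 4)) = r3 := by
          have h0 := congrArg (List.drop (n1.length + m1.length + 4)) hdrop
          rw [List.drop_drop] at h0
          rw [h0]
          rw [show ('<' :: ':' :: (n1 ++ ':' :: (m1 ++ '>' :: r3)))
              = (('<' :: ':' :: n1) ++ ':' :: m1 ++ ['>']) ++ r3 by simp]
          rw [List.drop_left' (by simp <;> omega)]
        have hlen' : r3.length ≤ n := by
          simp [List.length_cons, List.length_append] at hlen
          omega
        have hpre' : (j + (n1.length + m1.length + 4)) = 0 ∨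
            ¬(o.toList[(j + (n1.length + m1.length + 4)) - 1]? = some '<' ∧
              o.toList[j + (n1.length + m1.length + 4)]? = some ':') := by
          right
          rintro ⟨h1, -⟩
          have h2 : o.toList[j + (n1.length + m1.length + 3)]? = some '>' := by
            rw [hidx (n1.length + m1.length + 3)]
            rw [show ('<' :: ':' :: (n1 ++ ':' :: (m1 ++ '>' :: r3)))
                = (('<' :: ':' :: n1) ++ ':' :: m1) ++ '>' :: r3 by simp]
            rw [List.getElem?_append_right (by simp <;> omega)]
            simp
          rw [show j + (n1.length + m1.length + 4) - 1 = j + (n1.length + m1.length + 3) by omega]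
            at h1
          rw [h2] at h1
          simp at h1
        have := ih (j + (n1.length + m1.length + 4)) r3 (replaceStep v (n1, m1)) hlen' hdropT hpre'
        rw [show (j : Int) + 1 + 1 + (n1.length : Int) + 1 + (m1.length : Int) + 1
            = ((j + (n1.length + m1.length + 4) : Nat) : Int) by push_cast; ring]
        exact this
      | none =>
        rw [findMatches_cons_none hma]
        by_cases hlt : c = '<' ∧ rest.head? = some ':'
        · -- "<:" seen but the span never completes: A stays in the emoji state, B finds nothing
          obtain ⟨hc, hh⟩ := hlt
          subst hc
          cases rest with
          | nil => simp at hh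
          | cons h2 rest2 =>
            have hh2 : h2 = ':' := by simpa using hh
            subst hh2
            have hg : o.toList[j]? = some '<' := by simpa using hidx 0
            rw [foldA_enter o j _ v hg]
            cases h1 : rest2.dropWhile (· != ':') with
            | nil =>
              have hnc : ∀ x ∈ rest2, x ≠ ':' := by
                intro x hx
                simpa using List.dropWhile_eq_nil_iff.mp h1 x hx
              rw [foldA_state1_nil o rest2 hnc _ _ _ _ _]
              rw [findMatches_cons_none (matchAt_ne_lt (by decide)),
                findMatches_no_colon hnc]
              rfl
            | cons d1 r2 =>
              have hd1 : d1 = ':' := by simpa using dropWhile_head_false h1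
              subst hd1
              have h2 : r2.dropWhile (· != '>') = [] := by
                cases h2' : r2.dropWhile (· != '>') with
                | nil => rfl
                | cons d2 r3 =>
                  exfalso
                  have : matchAt ('<' :: ':' :: rest2)
                      = some (rest2.takeWhile (· != ':'), r2.takeWhile (· != '>'), r3) := by
                    simp [matchAt, h1, h2']
                  rw [hma] at this
                  exact absurd this (by simp)
              have hng : ∀ x ∈ r2, x ≠ '>' := by
                intro x hx
                simpa using List.dropWhile_eq_nil_iff.mp h2 x hx
              have hrest2 : rest2 = rest2.takeWhile (· != ':') ++ ':' :: r2 := by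
                conv_lhs => rw [← List.takeWhile_append_dropWhile (p := (· != ':')) (l := rest2)]
                rw [h1]
              have hn1 : ∀ x ∈ rest2.takeWhile (· != ':'), x ≠ ':' := by
                intro x hx
                simpa using List.mem_takeWhile_imp hx
              conv_lhs => rw [hrest2]
              rw [foldA_state1_skip o _ hn1 _ _ _ _ _ _]
              rw [PySem.List.enumerate_cons, List.foldl_cons]
              have s3 : parseStep o (true, false, (j : Int), -1, -1, v)
                  ((j : Int) + 1 + 1 + ((rest2.takeWhile (· != ':')).length : Int), ':')
                  = (true, true, (j : Int),
                     (j : Int) + 1 + 1 + ((rest2.takeWhile (· != ':')).length : Int) + 1, -1, v) := by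
                simp [parseStep]
              rw [s3]
              rw [foldA_state2_nil o r2 hng _ _ _ _ _]
              rw [findMatches_cons_none (matchAt_ne_lt (by decide))]
              conv_rhs => rw [hrest2]
              rw [findMatches_stuck hn1 hng]
              rfl
        · -- no match at this position: both sides move one character forward
          have hstep : parseStep o (false, false, -1, -1, -1, v) ((j : Int), c)
              = (false, false, -1, -1, -1, v) := by
            by_cases hc : c = ':'
            · subst hc
              by_cases hj0 : j = 0
              · subst hj0; simp [parseStep]
              · have hj : (j : Int) ≠ 0 := by omega
                have hnp : ¬(o.toList[j-1]? = some '<' ∧ o.toList[j]? = some ':') := by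
                  rcases hpre with h0 | h0
                  · exact absurd h0 hj0
                  · exact h0
                have hgl : o.toList[j]? = some ':' := by simpa using hidx 0
                have hne : o.toList[j-1]? ≠ some '<' := fun hl => hnp ⟨hl, hgl⟩
                have ecast : ((j : Int) - 1) = ((j - 1 : Nat) : Int) := by omega
                simp [parseStep, ecast, hne]
            · simp [parseStep, hc]
          rw [PySem.List.enumerate_cons, List.foldl_cons, hstep]
          have hdrop' : o.toList.drop (j + 1) = rest := by
            have h0 := congrArg (List.drop 1) hdrop
            rw [List.drop_drop] at h0
            simpa using h0
          have hpre' : (j + 1) = 0 ∨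
              ¬(o.toList[(j + 1) - 1]? = some '<' ∧ o.toList[j + 1]? = some ':') := by
            right
            rintro ⟨h1, h2⟩
            apply hlt
            constructor
            · have h3 := hidx 0
              simp at h3
              rw [show j + 1 - 1 = j by omega, h3] at h1
              simpa using h1
            · have h4 := hidx 1
              simp at h4
              rw [h4] at h2
              simpa [List.head?_eq_getElem?] using h2
          have := ih (j + 1) rest v (by simpa using hlen) hdrop' hpre'
          rw [show (j : Int) + 1 = ((j + 1 : Nat) : Int) by push_cast; ring]
          exact this

-- ===== VERDICT (by name: the statement is the Claim_ definition above) =====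
theorem parse_emojis_spec : Claim_equal_parse_emojis := by
  intro value _
  unfold Spec_parse_emojis parse_emojis parse_emojis_alt
  have := main_sim value value.toList.length 0 value.toList value (le_refl _)
    (by simp) (Or.inl rfl)
  simpa using this
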